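-- pv_equiv track=rewrite | github.com/Tech180/pokefirered-expansion | scripts/build_data.py | format_moves
-- ===== SOURCE A (Python) =====
-- def sanitize_c_identifier(s):
--     if not s:
--         return "0"
--     if not isinstance(s, str):
--         return str(s)
--     return s.strip().replace(" ", "_")
--
-- def format_moves(moves):
--     if not moves:
--         return "MOVE_NONE, MOVE_NONE, MOVE_NONE, MOVE_NONE"
--     # GBA engine expects 4 moves or trailing zeroes
--     formatted = []
--     for i in range(4):
--         if i < len(moves):
--             formatted.append(sanitize_c_identifier(moves[i]))
--         else:
--             formatted.append("MOVE_NONE")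
--     return ", ".join(formatted)
-- ===== SOURCE B (Python) =====
-- def sanitize_c_identifier(s):
--     if not s:
--         return "0"
--     if not isinstance(s, str):
--         return str(s)
--     return s.strip().replace(" ", "_")
--
-- def format_moves(moves):
--     # Recursive: consume moves cons-by-cons with a slot counter, building the
--     # comma-joined string directly (no intermediate list, no join, no special cases).
--     def go(ms, n):
--         head = sanitize_c_identifier(ms[0]) if ms else "MOVE_NONE"
--         if n == 1:
--             return head
--         return head + ", " + go(ms[1:], n - 1)
--     return go(moves, 4)
-- ===== Notes on version B (the rewrite author's own statement) =====
-- stated objective: alternative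
-- what changed: Replaces A's list-building range(4) loop with index guard, empty-list shortcut and ', '.join by a structural recursion over the cons cells with a slot counter that concatenates the comma-separated string directly, with no intermediate list and no join.
import Mathlib
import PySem

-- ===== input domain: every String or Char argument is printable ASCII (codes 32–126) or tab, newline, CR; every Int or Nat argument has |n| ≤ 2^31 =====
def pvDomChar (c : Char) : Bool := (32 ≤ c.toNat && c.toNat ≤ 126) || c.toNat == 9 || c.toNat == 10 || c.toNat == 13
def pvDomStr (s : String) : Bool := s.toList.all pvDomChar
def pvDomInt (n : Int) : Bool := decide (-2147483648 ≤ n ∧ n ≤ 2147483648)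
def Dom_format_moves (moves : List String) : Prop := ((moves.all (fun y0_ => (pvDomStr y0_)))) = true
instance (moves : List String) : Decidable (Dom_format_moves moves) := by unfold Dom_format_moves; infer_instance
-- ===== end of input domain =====

-- B replaces A's list-building range(4) loop (with index guard, empty-list shortcut and
-- ', '.join) by a structural recursion with a slot counter that concatenates the result
-- string directly (objective: alternative decomposition).


-- ===== PORT A =====
-- sanitize_c_identifier; the isinstance branch never fires (the argument is a str)
def sanitize_c_identifier (s : String) : String :=
  if s = "" then "0"
  else PySem.Str.replace (PySem.Str.strip s) " " "_"

def format_moves (moves : List String) : String :=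
  if moves = [] then "MOVE_NONE, MOVE_NONE, MOVE_NONE, MOVE_NONE"
  else
    let formatted := (PySem.List.pyRange 0 4 1).foldl (fun acc i =>
      if i < (moves.length : Int) then
        acc ++ [sanitize_c_identifier (PySem.List.pyGetD moves i "")]
      else
        acc ++ ["MOVE_NONE"]) []
    PySem.Str.join ", " formatted

-- ===== PORT B =====
def sanitize_c_identifier_alt (s : String) : String :=
  if s = "" then "0"
  else PySem.Str.replace (PySem.Str.strip s) " " "_"

-- helper 'go' of Source B: recursion on the slot counter, peeling one cons cell per step
def format_moves_go (ms : List String) (n : Nat) : String :=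
  let head := match ms with
    | [] => "MOVE_NONE"
    | s :: _ => sanitize_c_identifier_alt s
  match n with
  | 0 => head            -- unreachable from the initial call with n = 4
  | 1 => head
  | n + 2 => head ++ ", " ++ format_moves_go ms.tail (n + 1)

def format_moves_alt (moves : List String) : String :=
  format_moves_go moves 4

-- ===== PRECONDITION & SPEC =====
def Spec_format_moves (moves : List String) (out : String) : Prop := out = format_moves_alt moves
instance (moves : List String) (out : String) : Decidable (Spec_format_moves moves out) := by unfold Spec_format_moves; infer_instance

-- ===== CLAIM (what is proved, stated in full; the proofs are below) =====
def Claim_equal_format_moves : Prop := ∀ (moves : List String), Dom_format_moves moves → Spec_format_moves moves (format_moves moves)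

-- ===== LEMMAS AND PROOFS =====


theorem pv_join4 (w x y z : String) :
    PySem.Str.join ", " [w, x, y, z] = w ++ ", " ++ (x ++ ", " ++ (y ++ ", " ++ z)) := by
  apply String.toList_injective
  simp [PySem.Chars.join, PySem.Str.join, List.intercalate]

theorem format_moves_eq (moves : List String) :
    format_moves moves = format_moves_alt moves := by
  match moves with
  | [] => decide
  | [a] =>
      simp [format_moves, format_moves_alt, format_moves_go,
        sanitize_c_identifier, sanitize_c_identifier_alt,
        PySem.List.pyRange, PySem.List.pyGetD, PySem.List.pyGet?, PySem.List.pyIdx?,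
        List.range_succ, List.foldl, pv_join4]
  | [a, b] =>
      simp [format_moves, format_moves_alt, format_moves_go,
        sanitize_c_identifier, sanitize_c_identifier_alt,
        PySem.List.pyRange, PySem.List.pyGetD, PySem.List.pyGet?, PySem.List.pyIdx?,
        List.range_succ, List.foldl, pv_join4]
  | [a, b, c] =>
      simp [format_moves, format_moves_alt, format_moves_go,
        sanitize_c_identifier, sanitize_c_identifier_alt,
        PySem.List.pyRange, PySem.List.pyGetD, PySem.List.pyGet?, PySem.List.pyIdx?,
        List.range_succ, List.foldl, pv_join4]
  | a :: b :: c :: d :: rest =>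
      have h0 : (0:Int) ≤ (rest.length:Int) + 1 + 1 := by omega
      have h1 : (0:Int) ≤ (rest.length:Int) + 1 + 1 + 1 := by omega
      have h2 : (2:Int) ≤ (rest.length:Int) + 1 + 1 + 1 := by omega
      have h3 : (3:Int) ≤ (rest.length:Int) + 1 + 1 + 1 := by omega
      simp [h0, h1, h2, h3, format_moves, format_moves_alt, format_moves_go,
        sanitize_c_identifier, sanitize_c_identifier_alt,
        PySem.List.pyRange, PySem.List.pyGetD, PySem.List.pyGet?, PySem.List.pyIdx?,
        List.range_succ, List.foldl, pv_join4]

-- ===== VERDICT (by name: the statement is the Claim_ definition above) =====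
theorem format_moves_spec : Claim_equal_format_moves := by
  intro moves _
  exact format_moves_eq moves
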